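-- pv_equiv track=rewrite | github.com/Abjad/abjad | trunk/abjad/tools/seqtools/get_cyclic.py | get_cyclic
-- ===== SOURCE A (Python) =====
-- def get_cyclic(sequence, start, stop):
--    '''Iterate `sequence` cyclically from `start` to `stop`::
--
--       abjad> list(seqtools.get_cyclic(range(20), 18, 10))
--       [18, 19, 0, 1, 2, 3, 4, 5, 6, 7, 8, 9]
--
--    Return generator of references to `sequence` elements.
--    '''
--
--    len_sequence = len(sequence)
--    cur_index = start
--    cyclic_stop = stop % len_sequence
--    while True:
--       cyclic_cur_index = cur_index % len_sequence
--       if cyclic_cur_index == cyclic_stop: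
--          return
--       else:
--          yield sequence[cyclic_cur_index]
--          cur_index += 1
-- ===== SOURCE B (Python) =====
-- def get_cyclic(sequence, start, stop):
--     '''Iterate `sequence` cyclically from `start` to `stop`.
--
--     Re-implementation: rotate the sequence so it begins at `start`
--     (two slices concatenated), then yield the prefix of length
--     (stop - start) % len(sequence).  No per-element cyclic indexing;
--     the division stays inside the generator so the ZeroDivisionError
--     on an empty sequence still fires lazily on first next().
--     '''
--     n = len(sequence)
--     count = (stop - start) % n
--     s = start % n
--     rotated = sequence[s:] + sequence[:s]
--     yield from rotated[:count]
-- ===== Notes on version B (the rewrite author's own statement) =====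
-- stated objective: simpler
-- what changed: B builds the rotated sequence once by slice concatenation sequence[s:]+sequence[:s] and yields its prefix of length (stop-start)%n, instead of A's unbounded while-True loop that computes a modulo index and tests a cyclic-index equality before every yield.
import Mathlib
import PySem

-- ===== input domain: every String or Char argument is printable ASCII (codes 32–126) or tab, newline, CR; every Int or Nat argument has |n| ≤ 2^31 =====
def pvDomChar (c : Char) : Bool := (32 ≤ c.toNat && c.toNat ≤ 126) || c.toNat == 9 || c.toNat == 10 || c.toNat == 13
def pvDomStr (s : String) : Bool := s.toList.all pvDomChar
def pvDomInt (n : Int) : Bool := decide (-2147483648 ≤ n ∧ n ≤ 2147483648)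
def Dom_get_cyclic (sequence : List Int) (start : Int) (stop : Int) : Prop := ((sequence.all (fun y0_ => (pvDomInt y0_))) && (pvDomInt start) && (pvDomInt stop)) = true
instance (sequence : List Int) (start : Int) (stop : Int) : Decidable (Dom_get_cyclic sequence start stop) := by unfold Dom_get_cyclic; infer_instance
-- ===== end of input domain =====

-- B replaces A's while-True loop (per-step cyclic index + stop test) by rotating the
-- sequence once via slice concatenation and taking a closed-form-length prefix: simpler.
-- Both programs are generators; equivalence is about the list of yielded values.

-- ===== PORT A =====
-- A's `while True` loop. The loop performs exactly ((stop - start) % n) < n iterations,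
-- so fuel = sequence.length bounds it; the fuel-0 branch is unreachable under Pre_.
def get_cyclic_loop (sequence : List Int) (n : Int) (cyclic_stop : Int) : Nat → Int → List Int
  | 0, _ => []
  | fuel+1, cur_index =>
    let cyclic_cur_index := PySem.Int.mod cur_index n
    if cyclic_cur_index = cyclic_stop then []
    else -- sequence[cyclic_cur_index]: index always in [0, n), so in range
      (PySem.List.pyGet? sequence cyclic_cur_index).getD 0 ::
        get_cyclic_loop sequence n cyclic_stop fuel (cur_index + 1)

def get_cyclic (sequence : List Int) (start : Int) (stop : Int) : List Int :=
  let len_sequence : Int := sequence.length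
  let cyclic_stop := PySem.Int.mod stop len_sequence
  get_cyclic_loop sequence len_sequence cyclic_stop sequence.length start

-- ===== PORT B =====
def get_cyclic_alt (sequence : List Int) (start : Int) (stop : Int) : List Int :=
  let n : Int := sequence.length
  let count := PySem.Int.mod (stop - start) n
  let s := PySem.Int.mod start n
  let rotated := PySem.List.slice sequence (some s) none ++ PySem.List.slice sequence none (some s)
  PySem.List.slice rotated none (some count)

-- ===== PRECONDITION & SPEC =====
-- On an empty sequence both A and B raise ZeroDivisionError when first advanced.
def Pre_get_cyclic (sequence : List Int) (start : Int) (stop : Int) : Prop := sequence ≠ []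
instance (sequence : List Int) (start : Int) (stop : Int) : Decidable (Pre_get_cyclic sequence start stop) := by unfold Pre_get_cyclic; infer_instance
def pvWitness_get_cyclic : List Int × Int × Int := ([10, 20, 30], 2, 1)

def Spec_get_cyclic (sequence : List Int) (start : Int) (stop : Int) (out : List Int) : Prop := out = get_cyclic_alt sequence start stop
instance (sequence : List Int) (start : Int) (stop : Int) (out : List Int) : Decidable (Spec_get_cyclic sequence start stop out) := by unfold Spec_get_cyclic; infer_instance

-- ===== CLAIM (what is proved, stated in full; the proofs are below) =====
def Claim_equal_get_cyclic : Prop := ∀ (sequence : List Int) (start : Int) (stop : Int), Dom_get_cyclic sequence start stop → Pre_get_cyclic sequence start stop → Spec_get_cyclic sequence start stop (get_cyclic sequence start stop)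

-- ===== LEMMAS AND PROOFS =====

-- A's loop computed in closed form: a map over a counted range.
lemma get_cyclic_loop_eq (sequence : List Int) (cstop : Int)
    (hn : 0 < (sequence.length : Int))
    (hcs0 : 0 ≤ cstop) (hcs1 : cstop < (sequence.length : Int)) :
    ∀ (fuel : Nat) (cur : Int),
      ((cstop - cur) % (sequence.length : Int)).toNat < fuel →
      get_cyclic_loop sequence (sequence.length : Int) cstop fuel cur =
        (List.range ((cstop - cur) % (sequence.length : Int)).toNat).map
          (fun (i : Nat) => (PySem.List.pyGet? sequence
              (PySem.Int.mod (cur + (i : Int)) (sequence.length : Int))).getD 0) := by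
  set n : Int := (sequence.length : Int) with hn_def
  intro fuel
  induction fuel with
  | zero => intro cur h; omega
  | succ fuel ih =>
    intro cur hfuel
    have hmod : PySem.Int.mod cur n = cur % n := PySem.Int.mod_eq_emod_of_pos hn
    have hm0 : 0 ≤ (cstop - cur) % n := Int.emod_nonneg _ (by omega)
    have hm1 : (cstop - cur) % n < n := Int.emod_lt_of_pos _ hn
    by_cases heq : cur % n = cstop
    · have hz : (cstop - cur) % n = 0 := by
        have : (cstop - cur) % n = (cstop % n - cur % n) % n := Int.sub_emod _ _ _
        rw [this, heq, Int.emod_eq_of_lt hcs0 hcs1, sub_self, Int.zero_emod]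
      rw [hz]
      simp [get_cyclic_loop, hmod, heq]
    · have hzne : (cstop - cur) % n ≠ 0 := by
        intro hz
        apply heq
        have hdvd : n ∣ (cur - cstop) := by
          have h : n ∣ (cstop - cur) := Int.dvd_of_emod_eq_zero hz
          rw [← neg_sub]
          exact dvd_neg.mpr h
        have : (cur - cstop) % n = 0 := Int.emod_eq_zero_of_dvd hdvd
        have h2 : cur % n = cstop % n := by
          rw [Int.emod_eq_emod_iff_emod_sub_eq_zero]; exact this
        rw [h2, Int.emod_eq_of_lt hcs0 hcs1]
      have hmpos : 0 < (cstop - cur) % n := lt_of_le_of_ne hm0 (Ne.symm hzne)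
      have hstep : (cstop - (cur + 1)) % n = (cstop - cur) % n - 1 := by
        have hdm := Int.emod_add_mul_ediv (cstop - cur) n
        have hrw : cstop - (cur + 1) = ((cstop - cur) % n - 1) + n * ((cstop - cur) / n) := by
          omega
        rw [hrw, Int.add_mul_emod_self_left, Int.emod_eq_of_lt (by omega) (by omega)]
      have hk : ((cstop - cur) % n).toNat = ((cstop - (cur + 1)) % n).toNat + 1 := by
        rw [hstep]; omega
      rw [hk, List.range_succ_eq_map, List.map_cons, List.map_map]
      show (if PySem.Int.mod cur n = cstop then _ else _) = _
      rw [hmod, if_neg heq, ih (cur + 1) (by omega)]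
      congr 1
      · norm_num [PySem.Int.mod_eq_emod_of_pos hn]
      · apply List.map_congr_left
        intro i _
        simp only [Function.comp]
        congr 3
        push_cast
        ring

-- The counted cyclic-index map equals B's rotate-then-take, elementwise.
lemma map_range_eq_rotate_take (sequence : List Int) (start : Int) (k : Nat)
    (hne : sequence ≠ []) (hk : k ≤ sequence.length) :
    (List.range k).map (fun (i : Nat) =>
        (PySem.List.pyGet? sequence
          (PySem.Int.mod (start + (i : Int)) (sequence.length : Int))).getD 0)
      = (sequence.drop (PySem.Int.mod start (sequence.length : Int)).toNat
          ++ sequence.take (PySem.Int.mod start (sequence.length : Int)).toNat).take k := by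
  have hlen : 0 < sequence.length := List.length_pos_of_ne_nil hne
  have hn : 0 < (sequence.length : Int) := by exact_mod_cast hlen
  set N : Int := (sequence.length : Int) with hN
  have hs_eq : PySem.Int.mod start N = start % N := PySem.Int.mod_eq_emod_of_pos hn
  set s : Nat := (PySem.Int.mod start N).toNat with hs
  have hs0 : 0 ≤ start % N := Int.emod_nonneg _ (by omega)
  have hs1 : start % N < N := Int.emod_lt_of_pos _ hn
  have hslt : s < sequence.length := by
    have : (s : Int) = start % N := by rw [hs, hs_eq]; omega
    omega
  apply List.ext_getElem
  · simp [hk]; omega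
  · intro j hj1 hj2
    simp only [List.getElem_map, List.getElem_range, List.getElem_take]
    have hjk : j < k := by simpa using hj1
    have hjlen : j < sequence.length := lt_of_lt_of_le hjk hk
    -- the cyclic index, as an Int
    have hm_eq : PySem.Int.mod (start + (j : Int)) N = ((s : Int) + j) % N := by
      rw [PySem.Int.mod_eq_emod_of_pos hn, Int.add_emod, ← hs_eq]
      rw [hs_eq]
      have : (s : Int) = start % N := by rw [hs, hs_eq]; omega
      rw [Int.add_emod ((s:Int)) (j:Int), this, Int.emod_emod_of_dvd _ dvd_rfl]
    have hm0 : 0 ≤ ((s : Int) + j) % N := Int.emod_nonneg _ (by omega)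
    have hm1 : ((s : Int) + j) % N < N := Int.emod_lt_of_pos _ hn
    have hget : (PySem.List.pyGet? sequence (PySem.Int.mod (start + (j : Int)) N)).getD 0
        = sequence[(((s : Int) + j) % N).toNat]'(by omega) := by
      rw [hm_eq, PySem.List.pyGet?_eq_some_getElem _ hm0 (by omega)]
      rfl
    rw [hget]
    by_cases hcase : s + j < sequence.length
    · have hmval : ((s : Int) + j) % N = (s : Int) + j := by
        rw [Int.emod_eq_of_lt (by omega) (by rw [hN]; exact_mod_cast hcase)]
      rw [List.getElem_append_left (by simp [List.length_drop]; omega)]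
      rw [List.getElem_drop]
      congr 1
      omega
    · have hbig : s + j < 2 * sequence.length := by omega
      have hmval : ((s : Int) + j) % N = (s : Int) + j - N := by
        have hre : ((s : Int) + j) % N = (((s : Int) + j - N) + N * 1) % N := by ring_nf
        rw [hre, Int.add_mul_emod_self_left,
          Int.emod_eq_of_lt (by rw [hN]; omega) (by rw [hN]; omega)]
      rw [List.getElem_append_right (by simp [List.length_drop]; omega)]
      simp only [List.getElem_take]
      congr 1
      simp [List.length_drop]
      omega

-- ===== VERDICT (by name: the statement is the Claim_ definition above) =====
theorem get_cyclic_spec : Claim_equal_get_cyclic := by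
  intro sequence start stop _ hpre
  unfold Spec_get_cyclic get_cyclic get_cyclic_alt
  have hlen : 0 < sequence.length := List.length_pos_of_ne_nil hpre
  have hn : 0 < (sequence.length : Int) := by exact_mod_cast hlen
  have hstop : PySem.Int.mod stop (sequence.length : Int) = stop % (sequence.length : Int) :=
    PySem.Int.mod_eq_emod_of_pos hn
  have hcnt : PySem.Int.mod (stop - start) (sequence.length : Int)
      = (stop % (sequence.length : Int) - start) % (sequence.length : Int) := by
    rw [PySem.Int.mod_eq_emod_of_pos hn, Int.sub_emod stop start,
        Int.sub_emod (stop % (sequence.length : Int)) start,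
        Int.emod_emod_of_dvd _ dvd_rfl]
  have hcnt0 : 0 ≤ (stop % (sequence.length : Int) - start) % (sequence.length : Int) :=
    Int.emod_nonneg _ (by omega)
  have hcnt1 : (stop % (sequence.length : Int) - start) % (sequence.length : Int)
      < (sequence.length : Int) := Int.emod_lt_of_pos _ hn
  show get_cyclic_loop sequence (sequence.length : Int)
      (PySem.Int.mod stop (sequence.length : Int)) sequence.length start
    = PySem.List.slice
        (PySem.List.slice sequence (some (PySem.Int.mod start (sequence.length : Int))) none
          ++ PySem.List.slice sequence none (some (PySem.Int.mod start (sequence.length : Int))))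
        none (some (PySem.Int.mod (stop - start) (sequence.length : Int)))
  -- A's loop as a map over a counted range
  rw [hstop]
  rw [get_cyclic_loop_eq sequence (stop % (sequence.length : Int)) hn
    (Int.emod_nonneg _ (by omega)) (Int.emod_lt_of_pos _ hn)
    sequence.length start (by omega)]
  -- B's slices as drop / take
  have hsmod0 : 0 ≤ PySem.Int.mod start (sequence.length : Int) := by
    rw [PySem.Int.mod_eq_emod_of_pos hn]; exact Int.emod_nonneg _ (by omega)
  rw [PySem.List.slice_from _ hsmod0, PySem.List.slice_to _ hsmod0,
      PySem.List.slice_to _ (by rw [hcnt]; exact hcnt0)]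
  rw [map_range_eq_rotate_take sequence start _ hpre (by omega)]
  congr 2
  rw [hcnt]
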